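-- pv_equiv track=rewrite | github.com/jiwonjae-svg/itacolumite | src/itacolumite/core/coordinate_validation.py | build_retry_hint
-- ===== SOURCE A (Python) =====
-- def build_retry_hint(reasons: list[str]) -> str:
--     """Build a short retry hint that can be appended to the next prompt."""
--     is_drag = any(reason.startswith("start_") or reason.startswith("end_") for reason in reasons)
--
--     if is_drag and _has_reason(reasons, "repeat_failure_hotspot"):
--         return "Do not retry the same drag path. Choose a different source or destination target."
--     if is_drag and _has_reason(reasons, "missing_bbox"):
--         return "For mouse_drag, return start_bbox_norm/start_center_norm and end_bbox_norm/end_center_norm."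
--     if is_drag and _has_reason(reasons, "missing_target_coordinates"):
--         return "For mouse_drag, return both a grounded drag source and a grounded drag destination."
--     if is_drag and (_has_reason(reasons, "center_norm_out_of_range") or _has_reason(reasons, "bbox_norm_out_of_range")):
--         return "For mouse_drag, normalize both start and end coordinates to the 0.0-1.0 screenshot range."
--     if is_drag and _has_reason(reasons, "low_confidence"):
--         return "Do not guess the drag source or destination. Return clearer visible start and end targets."
--     if is_drag and _has_reason(reasons, "external_provider_conflict"):
--         return "The proposed drag path conflicts with OCR or detection evidence. Re-ground both drag endpoints."
--     if is_drag and _has_reason(reasons, "near_screen_edge"):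
--         return "The drag source or destination is too close to the screen edge. Return tighter visible target boxes."
--     if is_drag and (
--         _has_reason(reasons, "low_crop_contrast")
--         or _has_reason(reasons, "low_crop_structure")
--         or _has_reason(reasons, "flat_local_crop")
--     ):
--         return "The proposed drag targets look visually weak. Return tighter boxes around the real drag handle and drop target."
--
--     if _has_reason(reasons, "bbox_too_small"):
--         return "Return a larger visible target region with bbox_norm and center_norm."
--     if _has_reason(reasons, "bbox_too_large"):
--         return "Return a tighter bbox around the actual clickable control, not a broad region."
--     if _has_reason(reasons, "repeat_failure_hotspot"):
--         return "Do not retry the same area. Pick a different visible target or alternate action."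
--     if _has_reason(reasons, "missing_bbox"):
--         return "Return both bbox_norm and center_norm for the intended target."
--     if _has_reason(reasons, "center_norm_out_of_range") or _has_reason(reasons, "bbox_norm_out_of_range"):
--         return "Return normalized coordinates in the 0.0-1.0 range relative to the screenshot."
--     if _has_reason(reasons, "low_confidence"):
--         return "Do not guess. Describe the ambiguity and return a clearer target proposal."
--     if (
--         _has_reason(reasons, "low_crop_contrast")
--         or _has_reason(reasons, "low_crop_structure")
--         or _has_reason(reasons, "flat_local_crop")
--     ):
--         return "The proposed bbox looks visually weak. Return a tighter, more distinctive target region."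
--     if _has_reason(reasons, "external_provider_conflict"):
--         return "The proposed target conflicts with OCR or detection evidence. Re-evaluate the visible control."
--     if _has_reason(reasons, "near_screen_edge"):
--         return "The target is too close to the screen edge. Return a tighter visible bbox around the actual control."
--     return "Return a clearer visible target with normalized bbox_norm and center_norm."
--
-- def _has_reason(reasons: list[str], reason: str) -> bool:
--     return any(
--         candidate == reason or candidate.endswith(f"_{reason}")
--         for candidate in reasons
--     )
-- ===== SOURCE B (Python) =====
-- _KNOWN = (
--     "repeat_failure_hotspot",
--     "missing_bbox",
--     "missing_target_coordinates",
--     "center_norm_out_of_range",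
--     "bbox_norm_out_of_range",
--     "low_confidence",
--     "external_provider_conflict",
--     "near_screen_edge",
--     "low_crop_contrast",
--     "low_crop_structure",
--     "flat_local_crop",
--     "bbox_too_small",
--     "bbox_too_large",
-- )
--
-- _RULES = (
--     (True, ("repeat_failure_hotspot",),
--      "Do not retry the same drag path. Choose a different source or destination target."),
--     (True, ("missing_bbox",),
--      "For mouse_drag, return start_bbox_norm/start_center_norm and end_bbox_norm/end_center_norm."),
--     (True, ("missing_target_coordinates",),
--      "For mouse_drag, return both a grounded drag source and a grounded drag destination."),
--     (True, ("center_norm_out_of_range", "bbox_norm_out_of_range"),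
--      "For mouse_drag, normalize both start and end coordinates to the 0.0-1.0 screenshot range."),
--     (True, ("low_confidence",),
--      "Do not guess the drag source or destination. Return clearer visible start and end targets."),
--     (True, ("external_provider_conflict",),
--      "The proposed drag path conflicts with OCR or detection evidence. Re-ground both drag endpoints."),
--     (True, ("near_screen_edge",),
--      "The drag source or destination is too close to the screen edge. Return tighter visible target boxes."),
--     (True, ("low_crop_contrast", "low_crop_structure", "flat_local_crop"),
--      "The proposed drag targets look visually weak. Return tighter boxes around the real drag handle and drop target."),
--     (False, ("bbox_too_small",),
--      "Return a larger visible target region with bbox_norm and center_norm."),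
--     (False, ("bbox_too_large",),
--      "Return a tighter bbox around the actual clickable control, not a broad region."),
--     (False, ("repeat_failure_hotspot",),
--      "Do not retry the same area. Pick a different visible target or alternate action."),
--     (False, ("missing_bbox",),
--      "Return both bbox_norm and center_norm for the intended target."),
--     (False, ("center_norm_out_of_range", "bbox_norm_out_of_range"),
--      "Return normalized coordinates in the 0.0-1.0 range relative to the screenshot."),
--     (False, ("low_confidence",),
--      "Do not guess. Describe the ambiguity and return a clearer target proposal."),
--     (False, ("low_crop_contrast", "low_crop_structure", "flat_local_crop"),
--      "The proposed bbox looks visually weak. Return a tighter, more distinctive target region."),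
--     (False, ("external_provider_conflict",),
--      "The proposed target conflicts with OCR or detection evidence. Re-evaluate the visible control."),
--     (False, ("near_screen_edge",),
--      "The target is too close to the screen edge. Return a tighter visible bbox around the actual control."),
-- )
--
--
-- def build_retry_hint(reasons: list) -> str:
--     """Build a short retry hint that can be appended to the next prompt."""
--     # One pass over `reasons`: record drag-ness and which known base reasons occur.
--     is_drag = False
--     present = set()
--     for candidate in reasons:
--         if candidate.startswith("start_") or candidate.startswith("end_"):
--             is_drag = True
--         for base in _KNOWN:
--             if candidate == base or candidate.endswith("_" + base):
--                 present.add(base)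
--     # First matching rule of the ordered table wins.
--     for needs_drag, keys, message in _RULES:
--         if (not needs_drag or is_drag) and any(key in present for key in keys):
--             return message
--     return "Return a clearer visible target with normalized bbox_norm and center_norm."
-- ===== Notes on version B (the rewrite author's own statement) =====
-- stated objective: alternative
-- what changed: Replaces A's 17 hard-coded if-branches (each rescanning the list via _has_reason) with a single pass over reasons that records drag-ness and a set of present known base reasons, followed by a first-match lookup in an ordered (needs_drag, keys, message) rule table.
import Mathlib
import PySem

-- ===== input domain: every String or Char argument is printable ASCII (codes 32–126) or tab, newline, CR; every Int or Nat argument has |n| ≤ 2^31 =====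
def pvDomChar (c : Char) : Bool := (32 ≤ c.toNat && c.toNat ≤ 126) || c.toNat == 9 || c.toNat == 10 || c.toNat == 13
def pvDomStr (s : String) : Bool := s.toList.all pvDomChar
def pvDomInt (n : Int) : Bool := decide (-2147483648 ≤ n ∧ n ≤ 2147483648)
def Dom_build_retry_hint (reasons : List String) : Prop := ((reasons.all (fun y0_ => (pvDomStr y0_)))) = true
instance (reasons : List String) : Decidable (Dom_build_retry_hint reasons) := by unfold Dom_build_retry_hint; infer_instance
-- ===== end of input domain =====

-- B replaces A's 17 hard-coded if-branches (each rescanning the list) by one scan collecting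
-- drag-ness plus the set of present known reasons, then a first-match lookup in a rule table.

-- ===== PORT A =====
def pv_has_reason (reasons : List String) (reason : String) : Bool :=
  reasons.any (fun candidate => candidate == reason || PySem.Str.endswith candidate ("_" ++ reason))

def build_retry_hint (reasons : List String) : String :=
  let is_drag := reasons.any (fun reason =>
    PySem.Str.startswith reason "start_" || PySem.Str.startswith reason "end_")
  if is_drag && pv_has_reason reasons "repeat_failure_hotspot" then
    "Do not retry the same drag path. Choose a different source or destination target."
  else if is_drag && pv_has_reason reasons "missing_bbox" then
    "For mouse_drag, return start_bbox_norm/start_center_norm and end_bbox_norm/end_center_norm."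
  else if is_drag && pv_has_reason reasons "missing_target_coordinates" then
    "For mouse_drag, return both a grounded drag source and a grounded drag destination."
  else if is_drag && (pv_has_reason reasons "center_norm_out_of_range" || pv_has_reason reasons "bbox_norm_out_of_range") then
    "For mouse_drag, normalize both start and end coordinates to the 0.0-1.0 screenshot range."
  else if is_drag && pv_has_reason reasons "low_confidence" then
    "Do not guess the drag source or destination. Return clearer visible start and end targets."
  else if is_drag && pv_has_reason reasons "external_provider_conflict" then
    "The proposed drag path conflicts with OCR or detection evidence. Re-ground both drag endpoints."
  else if is_drag && pv_has_reason reasons "near_screen_edge" then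
    "The drag source or destination is too close to the screen edge. Return tighter visible target boxes."
  else if is_drag && (pv_has_reason reasons "low_crop_contrast" || pv_has_reason reasons "low_crop_structure" || pv_has_reason reasons "flat_local_crop") then
    "The proposed drag targets look visually weak. Return tighter boxes around the real drag handle and drop target."
  else if pv_has_reason reasons "bbox_too_small" then
    "Return a larger visible target region with bbox_norm and center_norm."
  else if pv_has_reason reasons "bbox_too_large" then
    "Return a tighter bbox around the actual clickable control, not a broad region."
  else if pv_has_reason reasons "repeat_failure_hotspot" then
    "Do not retry the same area. Pick a different visible target or alternate action."
  else if pv_has_reason reasons "missing_bbox" then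
    "Return both bbox_norm and center_norm for the intended target."
  else if pv_has_reason reasons "center_norm_out_of_range" || pv_has_reason reasons "bbox_norm_out_of_range" then
    "Return normalized coordinates in the 0.0-1.0 range relative to the screenshot."
  else if pv_has_reason reasons "low_confidence" then
    "Do not guess. Describe the ambiguity and return a clearer target proposal."
  else if pv_has_reason reasons "low_crop_contrast" || pv_has_reason reasons "low_crop_structure" || pv_has_reason reasons "flat_local_crop" then
    "The proposed bbox looks visually weak. Return a tighter, more distinctive target region."
  else if pv_has_reason reasons "external_provider_conflict" then
    "The proposed target conflicts with OCR or detection evidence. Re-evaluate the visible control."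
  else if pv_has_reason reasons "near_screen_edge" then
    "The target is too close to the screen edge. Return a tighter visible bbox around the actual control."
  else
    "Return a clearer visible target with normalized bbox_norm and center_norm."

-- ===== PORT B =====
def altKnown : List String :=
  ["repeat_failure_hotspot", "missing_bbox", "missing_target_coordinates",
   "center_norm_out_of_range", "bbox_norm_out_of_range", "low_confidence",
   "external_provider_conflict", "near_screen_edge", "low_crop_contrast",
   "low_crop_structure", "flat_local_crop", "bbox_too_small", "bbox_too_large"]

def altRules : List (Bool × List String × String) :=
  [(true, ["repeat_failure_hotspot"],
    "Do not retry the same drag path. Choose a different source or destination target."),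
   (true, ["missing_bbox"],
    "For mouse_drag, return start_bbox_norm/start_center_norm and end_bbox_norm/end_center_norm."),
   (true, ["missing_target_coordinates"],
    "For mouse_drag, return both a grounded drag source and a grounded drag destination."),
   (true, ["center_norm_out_of_range", "bbox_norm_out_of_range"],
    "For mouse_drag, normalize both start and end coordinates to the 0.0-1.0 screenshot range."),
   (true, ["low_confidence"],
    "Do not guess the drag source or destination. Return clearer visible start and end targets."),
   (true, ["external_provider_conflict"],
    "The proposed drag path conflicts with OCR or detection evidence. Re-ground both drag endpoints."),
   (true, ["near_screen_edge"],
    "The drag source or destination is too close to the screen edge. Return tighter visible target boxes."),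
   (true, ["low_crop_contrast", "low_crop_structure", "flat_local_crop"],
    "The proposed drag targets look visually weak. Return tighter boxes around the real drag handle and drop target."),
   (false, ["bbox_too_small"],
    "Return a larger visible target region with bbox_norm and center_norm."),
   (false, ["bbox_too_large"],
    "Return a tighter bbox around the actual clickable control, not a broad region."),
   (false, ["repeat_failure_hotspot"],
    "Do not retry the same area. Pick a different visible target or alternate action."),
   (false, ["missing_bbox"],
    "Return both bbox_norm and center_norm for the intended target."),
   (false, ["center_norm_out_of_range", "bbox_norm_out_of_range"],
    "Return normalized coordinates in the 0.0-1.0 range relative to the screenshot."),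
   (false, ["low_confidence"],
    "Do not guess. Describe the ambiguity and return a clearer target proposal."),
   (false, ["low_crop_contrast", "low_crop_structure", "flat_local_crop"],
    "The proposed bbox looks visually weak. Return a tighter, more distinctive target region."),
   (false, ["external_provider_conflict"],
    "The proposed target conflicts with OCR or detection evidence. Re-evaluate the visible control."),
   (false, ["near_screen_edge"],
    "The target is too close to the screen edge. Return a tighter visible bbox around the actual control.")]

-- one pass over `reasons`: (is_drag, set of present known base reasons)
def altScan (reasons : List String) : Bool × PySem.Set String :=
  reasons.foldl (fun st candidate =>
    ((if PySem.Str.startswith candidate "start_" || PySem.Str.startswith candidate "end_" then true else st.1),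
     altKnown.foldl (fun s base =>
       if candidate == base || PySem.Str.endswith candidate ("_" ++ base) then PySem.Set.add s base else s) st.2))
    (false, PySem.Set.empty)

-- first matching rule of the ordered table wins
def altFind : List (Bool × List String × String) → Bool → PySem.Set String → String
  | [], _, _ => "Return a clearer visible target with normalized bbox_norm and center_norm."
  | (needsDrag, keys, msg) :: rest, isDrag, present =>
    if (!needsDrag || isDrag) && keys.any (fun key => PySem.Set.contains present key) then msg
    else altFind rest isDrag present

def build_retry_hint_alt (reasons : List String) : String :=
  let st := altScan reasons
  altFind altRules st.1 st.2

-- ===== PRECONDITION & SPEC =====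
def Spec_build_retry_hint (reasons : List String) (out : String) : Prop := out = build_retry_hint_alt reasons
instance (reasons : List String) (out : String) : Decidable (Spec_build_retry_hint reasons out) := by unfold Spec_build_retry_hint; infer_instance

-- ===== CLAIM (what is proved, stated in full; the proofs are below) =====
def Claim_equal_build_retry_hint : Prop := ∀ (reasons : List String), Dom_build_retry_hint reasons → Spec_build_retry_hint reasons (build_retry_hint reasons)

-- ===== LEMMAS AND PROOFS =====

-- the drag flag computed by the single pass is A's `any`
theorem altScan_fst (reasons : List String) (b : Bool) (s : PySem.Set String) :
    (reasons.foldl (fun st candidate =>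
      ((if PySem.Str.startswith candidate "start_" || PySem.Str.startswith candidate "end_" then true else st.1),
       altKnown.foldl (fun s base =>
         if candidate == base || PySem.Str.endswith candidate ("_" ++ base) then PySem.Set.add s base else s) st.2))
      (b, s)).1
    = (b || reasons.any (fun reason =>
        PySem.Str.startswith reason "start_" || PySem.Str.startswith reason "end_")) := by
  induction reasons generalizing b s with
  | nil => simp
  | cons c cs ih =>
    simp only [List.foldl_cons, List.any_cons]
    rw [ih]
    cases h : (PySem.Str.startswith c "start_" || PySem.Str.startswith c "end_") <;> simp

-- membership in the set built by one candidate's inner scan over the known reasons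
theorem altInner_mem (R : List String) (s : PySem.Set String) (c k : String) :
    k ∈ R.foldl (fun s base =>
        if c == base || PySem.Str.endswith c ("_" ++ base) then PySem.Set.add s base else s) s
    ↔ k ∈ s ∨ (k ∈ R ∧ (c == k || PySem.Str.endswith c ("_" ++ k)) = true) := by
  induction R generalizing s with
  | nil => simp
  | cons r R' ih =>
    simp only [List.foldl_cons]
    rw [ih]
    by_cases hm : (c == r || PySem.Str.endswith c ("_" ++ r)) = true
    · rw [if_pos hm, PySem.Set.mem_add]
      by_cases hk : k = r
      · subst hk
        simp only [List.mem_cons]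
        tauto
      · simp only [List.mem_cons]
        tauto
    · rw [if_neg hm]
      by_cases hk : k = r
      · subst hk
        simp only [List.mem_cons]
        tauto
      · simp only [List.mem_cons]
        tauto

-- membership in the set built by the whole pass
theorem altScan_mem (reasons : List String) (b : Bool) (s : PySem.Set String) (k : String) :
    k ∈ (reasons.foldl (fun st candidate =>
      ((if PySem.Str.startswith candidate "start_" || PySem.Str.startswith candidate "end_" then true else st.1),
       altKnown.foldl (fun s base =>
         if candidate == base || PySem.Str.endswith candidate ("_" ++ base) then PySem.Set.add s base else s) st.2))
      (b, s)).2
    ↔ k ∈ s ∨ (k ∈ altKnown ∧ pv_has_reason reasons k = true) := by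
  induction reasons generalizing b s with
  | nil => simp [pv_has_reason]
  | cons c cs ih =>
    simp only [List.foldl_cons]
    rw [ih, altInner_mem]
    simp only [pv_has_reason, List.any_cons, Bool.or_eq_true, List.any_eq_true]
    clear ih
    constructor
    · rintro ((h | ⟨hK, h⟩) | ⟨hK, h⟩)
      · exact Or.inl h
      · exact Or.inr ⟨hK, Or.inl h⟩
      · exact Or.inr ⟨hK, Or.inr h⟩
    · rintro (h | ⟨hK, h | h⟩)
      · exact Or.inl (Or.inl h)
      · exact Or.inl (Or.inr ⟨hK, h⟩)
      · exact Or.inr ⟨hK, h⟩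

-- the Bool form actually rewritten in the final proof
theorem altScan_contains (reasons : List String) (k : String) (hk : k ∈ altKnown) :
    PySem.Set.contains (altScan reasons).2 k = pv_has_reason reasons k := by
  rw [Bool.eq_iff_iff]
  simp only [PySem.Set.contains_iff, altScan, altScan_mem]
  simp [PySem.Set.empty, hk]

theorem altScan_drag (reasons : List String) :
    (altScan reasons).1
    = reasons.any (fun reason =>
        PySem.Str.startswith reason "start_" || PySem.Str.startswith reason "end_") := by
  rw [altScan, altScan_fst]; simp

-- ===== VERDICT (by name: the statement is the Claim_ definition above) =====
theorem build_retry_hint_spec : Claim_equal_build_retry_hint := by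
  intro reasons _
  unfold Spec_build_retry_hint build_retry_hint build_retry_hint_alt
  simp only [altRules, altFind, List.any_cons, List.any_nil, Bool.or_false, Bool.or_assoc,
    altScan_drag, Bool.not_true, Bool.not_false, Bool.false_or, Bool.true_or, Bool.true_and]
  rw [altScan_contains reasons "repeat_failure_hotspot" (by decide),
      altScan_contains reasons "missing_bbox" (by decide),
      altScan_contains reasons "missing_target_coordinates" (by decide),
      altScan_contains reasons "center_norm_out_of_range" (by decide),
      altScan_contains reasons "bbox_norm_out_of_range" (by decide),
      altScan_contains reasons "low_confidence" (by decide),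
      altScan_contains reasons "external_provider_conflict" (by decide),
      altScan_contains reasons "near_screen_edge" (by decide),
      altScan_contains reasons "low_crop_contrast" (by decide),
      altScan_contains reasons "low_crop_structure" (by decide),
      altScan_contains reasons "flat_local_crop" (by decide),
      altScan_contains reasons "bbox_too_small" (by decide),
      altScan_contains reasons "bbox_too_large" (by decide)]
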